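-- pv_equiv track=rewrite | github.com/RonySan/HULI | modules/medication.py | formatar_horarios
-- ===== SOURCE A (Python) =====
-- def formatar_horarios(horarios, intervalo, dias):
--     resposta = (
--         f"Horários do medicamento de {intervalo} em {intervalo} horas "
--         f"por {dias} dia(s):\n\n"
--     )
--
--     dia_atual = None
--
--     for item in horarios:
--         if item["data"] != dia_atual:
--             dia_atual = item["data"]
--             resposta += f"\n📅 Dia {dia_atual}\n"
--
--         resposta += f"• Dose {item['dose']}: {item['hora']}\n"
--
--     resposta += (
--         "\n⚠️ Observação: confirme sempre com o médico ou farmacêutico "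
--         "em caso de dúvida sobre dose, atraso ou troca de medicamento."
--     )
--
--     return resposta
-- ===== SOURCE B (Python) =====
-- def _runs(horarios):
--     # Split the list into maximal runs of consecutive items sharing the same "data".
--     if not horarios:
--         return []
--     item = horarios[0]
--     data = item["data"]
--     resto = horarios[1:]
--     i = 0
--     while i < len(resto) and resto[i]["data"] == data:
--         i += 1
--     return [(data, [item] + resto[:i])] + _runs(resto[i:])
--
--
-- def _render_runs(runs):
--     if not runs:
--         return ""
--     data, grupo = runs[0]
--     linhas = "".join(f"• Dose {it['dose']}: {it['hora']}\n" for it in grupo)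
--     return f"\n📅 Dia {data}\n" + linhas + _render_runs(runs[1:])
--
--
-- def formatar_horarios(horarios, intervalo, dias):
--     return (
--         f"Horários do medicamento de {intervalo} em {intervalo} horas "
--         f"por {dias} dia(s):\n\n"
--         + _render_runs(_runs(horarios))
--         + "\n⚠️ Observação: confirme sempre com o médico ou farmacêutico "
--         "em caso de dúvida sobre dose, atraso ou troca de medicamento."
--     )
-- ===== Notes on version B (the rewrite author's own statement) =====
-- stated objective: alternative
-- what changed: Replaces A's single pass with a mutating dia_atual flag by a run-based decomposition: a recursive splitter groups consecutive same-'data' items into runs, and a renderer emits one header plus the dose lines per run.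
import Mathlib
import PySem

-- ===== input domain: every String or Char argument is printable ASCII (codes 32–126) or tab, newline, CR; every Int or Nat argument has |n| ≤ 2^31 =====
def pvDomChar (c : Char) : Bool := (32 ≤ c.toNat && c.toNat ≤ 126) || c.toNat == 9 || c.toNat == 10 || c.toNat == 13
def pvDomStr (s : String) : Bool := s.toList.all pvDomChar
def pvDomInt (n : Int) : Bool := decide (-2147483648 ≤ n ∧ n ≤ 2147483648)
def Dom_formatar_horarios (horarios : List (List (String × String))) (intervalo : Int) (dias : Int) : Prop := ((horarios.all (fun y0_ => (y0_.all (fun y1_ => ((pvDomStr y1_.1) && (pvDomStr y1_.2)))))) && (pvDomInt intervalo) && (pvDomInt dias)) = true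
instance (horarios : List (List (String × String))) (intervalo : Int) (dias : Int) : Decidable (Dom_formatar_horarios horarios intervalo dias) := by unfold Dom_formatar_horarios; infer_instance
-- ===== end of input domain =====

-- B replaces A's single pass with a mutating "current day" flag by a run-based
-- decomposition (split into consecutive same-day runs, then render each run);
-- same O(n) cost, objective: alternative.


-- ===== PORT A =====
-- item["key"] on the dict-as-association-list: first match; none = KeyError (excluded
-- by Pre_), the total port defaults to "" there (outside Pre_ nothing is claimed).
def pvLookup (item : List (String × String)) (k : String) : String :=
  (item.lookup k).getD ""

-- A's loop body: state (resposta, dia_atual), header appended when the day changes.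
def pvStepA (st : String × Option String) (item : List (String × String)) : String × Option String :=
  let data := pvLookup item "data"
  let st :=
    if some data ≠ st.2 then (st.1 ++ "\n📅 Dia " ++ data ++ "\n", some data) else st
  (st.1 ++ "• Dose " ++ pvLookup item "dose" ++ ": " ++ pvLookup item "hora" ++ "\n", st.2)

def formatar_horarios (horarios : List (List (String × String))) (intervalo : Int) (dias : Int) : String :=
  (horarios.foldl pvStepA
    ("Horários do medicamento de " ++ PySem.Int.toStr intervalo ++ " em " ++
     PySem.Int.toStr intervalo ++ " horas por " ++ PySem.Int.toStr dias ++ " dia(s):\n\n",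
     none)).1 ++
    "\n⚠️ Observação: confirme sempre com o médico ou farmacêutico em caso de dúvida sobre dose, atraso ou troca de medicamento."

-- ===== PORT B =====
-- Source B _runs: split into maximal runs of consecutive items with equal "data"
-- (the while loop scanning `resto` is exactly this takeWhile/dropWhile span).
def pvRuns : List (List (String × String)) → List (String × List (List (String × String)))
  | [] => []
  | item :: resto =>
    let data := pvLookup item "data"
    let grupo := resto.takeWhile (fun it => pvLookup it "data" == data)
    let resto' := resto.dropWhile (fun it => pvLookup it "data" == data)
    (data, item :: grupo) :: pvRuns resto'
termination_by l => l.length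
decreasing_by
  exact Nat.lt_succ_of_le (List.length_dropWhile_le _ _)

-- Source B _render_runs: one header per run, then its dose lines ("".join of the generator).
def pvRenderRuns : List (String × List (List (String × String))) → String
  | [] => ""
  | (data, grupo) :: resto =>
    let linhas := String.join (grupo.map
      (fun it => "• Dose " ++ pvLookup it "dose" ++ ": " ++ pvLookup it "hora" ++ "\n"))
    "\n📅 Dia " ++ data ++ "\n" ++ linhas ++ pvRenderRuns resto

def formatar_horarios_alt (horarios : List (List (String × String))) (intervalo : Int) (dias : Int) : String :=
  "Horários do medicamento de " ++ PySem.Int.toStr intervalo ++ " em " ++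
  PySem.Int.toStr intervalo ++ " horas por " ++ PySem.Int.toStr dias ++ " dia(s):\n\n" ++
  pvRenderRuns (pvRuns horarios) ++
  "\n⚠️ Observação: confirme sempre com o médico ou farmacêutico em caso de dúvida sobre dose, atraso ou troca de medicamento."

-- ===== PRECONDITION & SPEC =====
-- Pre_ excludes exactly the inputs where Python A raises KeyError: an item missing
-- one of the keys "data", "dose", "hora".
def Pre_formatar_horarios (horarios : List (List (String × String))) (intervalo : Int) (dias : Int) : Prop :=
  ∀ item ∈ horarios,
    (item.lookup "data").isSome ∧ (item.lookup "dose").isSome ∧ (item.lookup "hora").isSome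

instance (horarios : List (List (String × String))) (intervalo : Int) (dias : Int) : Decidable (Pre_formatar_horarios horarios intervalo dias) := by unfold Pre_formatar_horarios; infer_instance

def pvWitness_formatar_horarios : (List (List (String × String))) × Int × Int :=
  ([[("data", "01/01"), ("dose", "1"), ("hora", "08:00")],
    [("data", "01/01"), ("dose", "2"), ("hora", "16:00")],
    [("data", "02/01"), ("dose", "3"), ("hora", "00:00")]], 8, 1)

def Spec_formatar_horarios (horarios : List (List (String × String))) (intervalo : Int) (dias : Int) (out : String) : Prop := out = formatar_horarios_alt horarios intervalo dias
instance (horarios : List (List (String × String))) (intervalo : Int) (dias : Int) (out : String) : Decidable (Spec_formatar_horarios horarios intervalo dias out) := by unfold Spec_formatar_horarios; infer_instance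

-- ===== CLAIM (what is proved, stated in full; the proofs are below) =====
def Claim_equal_formatar_horarios : Prop := ∀ (horarios : List (List (String × String))) (intervalo : Int) (dias : Int), Dom_formatar_horarios horarios intervalo dias → Pre_formatar_horarios horarios intervalo dias → Spec_formatar_horarios horarios intervalo dias (formatar_horarios horarios intervalo dias)

-- ===== LEMMAS AND PROOFS =====

lemma str_foldl_append (l : List String) :
    ∀ a : String, l.foldl (· ++ ·) a = a ++ l.foldl (· ++ ·) "" := by
  induction l with
  | nil => intro a; simp [String.append_empty]
  | cons s l ih =>
    intro a
    simp only [List.foldl_cons]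
    rw [ih (a ++ s), ih (("" : String) ++ s), String.empty_append, String.append_assoc]

lemma str_join_cons (s : String) (l : List String) :
    String.join (s :: l) = s ++ String.join l := by
  simp only [String.join, List.foldl_cons]
  rw [str_foldl_append l (("" : String) ++ s), String.empty_append]

-- A's loop, restated structurally: rendering with a "current day" that suppresses the header.
def pvRenderA : Option String → List (List (String × String)) → String
  | _, [] => ""
  | cur, item :: rest =>
    let data := pvLookup item "data"
    (if some data ≠ cur then "\n📅 Dia " ++ data ++ "\n" else "") ++
    ("• Dose " ++ pvLookup item "dose" ++ ": " ++ pvLookup item "hora" ++ "\n") ++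
    pvRenderA (some data) rest

lemma foldA_eq_renderA (l : List (List (String × String))) :
    ∀ (acc : String) (cur : Option String),
      (l.foldl pvStepA (acc, cur)).1 = acc ++ pvRenderA cur l := by
  induction l with
  | nil => intro acc cur; simp [pvRenderA, String.append_empty]
  | cons item rest ih =>
    intro acc cur
    rw [List.foldl_cons]
    by_cases h : some (pvLookup item "data") = cur
    · have hstep : pvStepA (acc, cur) item =
          (acc ++ "• Dose " ++ pvLookup item "dose" ++ ": " ++ pvLookup item "hora" ++ "\n",
           cur) := by
        simp [pvStepA, h]
      rw [hstep, ih]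
      simp [pvRenderA, h, String.append_assoc, String.empty_append]
    · have hstep : pvStepA (acc, cur) item =
          (acc ++ "\n📅 Dia " ++ pvLookup item "data" ++ "\n" ++ "• Dose " ++
             pvLookup item "dose" ++ ": " ++ pvLookup item "hora" ++ "\n",
           some (pvLookup item "data")) := by
        simp [pvStepA, h]
      rw [hstep, ih]
      simp [pvRenderA, h, String.append_assoc]
      rw [show ("\n• Dose " : String) = "\n" ++ "• Dose " from rfl, String.append_assoc]

-- inside a run headed by day d, no header is emitted until the day changes
lemma renderA_some_eq (d : String) (xs : List (List (String × String))) :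
    pvRenderA (some d) xs =
      String.join ((xs.takeWhile (fun it => pvLookup it "data" == d)).map
        (fun it => "• Dose " ++ pvLookup it "dose" ++ ": " ++ pvLookup it "hora" ++ "\n")) ++
      pvRenderA none (xs.dropWhile (fun it => pvLookup it "data" == d)) := by
  induction xs with
  | nil => simp [pvRenderA, String.join]
  | cons y ys ih =>
    by_cases h : pvLookup y "data" = d
    · simp [pvRenderA, h, ih, str_join_cons, String.append_assoc, String.empty_append]
    · simp [pvRenderA, h, String.join, String.append_assoc, String.empty_append]

lemma renderA_eq_renderRuns : ∀ (n : Nat) (l : List (List (String × String))),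
    l.length ≤ n → pvRenderA none l = pvRenderRuns (pvRuns l) := by
  intro n
  induction n with
  | zero =>
    intro l hl
    have hnil : l = [] := List.eq_nil_of_length_eq_zero (Nat.le_zero.mp hl)
    subst hnil
    rw [pvRuns]
    simp [pvRenderA, pvRenderRuns]
  | succ n ih =>
    intro l hl
    match l with
    | [] =>
      rw [pvRuns]
      simp [pvRenderA, pvRenderRuns]
    | item :: resto =>
      rw [pvRuns]
      simp only [pvRenderRuns, pvRenderA]
      rw [renderA_some_eq]
      have hlen : (resto.dropWhile (fun it => pvLookup it "data" == pvLookup item "data")).length ≤ n := by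
        have := List.length_dropWhile_le (fun it => pvLookup it "data" == pvLookup item "data") resto
        simp at hl; omega
      rw [ih _ hlen]
      simp [str_join_cons, String.append_assoc]

-- ===== VERDICT (by name: the statement is the Claim_ definition above) =====
theorem formatar_horarios_spec : Claim_equal_formatar_horarios := by
  intro horarios intervalo dias _ _
  unfold Spec_formatar_horarios formatar_horarios formatar_horarios_alt
  rw [foldA_eq_renderA, renderA_eq_renderRuns horarios.length horarios (le_refl _)]
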